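-- pv_equiv track=rewrite | github.com/ZhuKerui/LongDoc | src/data.py | paragraph_parser
-- ===== SOURCE A (Python) =====
-- from typing import List
--
-- def paragraph_parser(article: str) -> List[str]:
--     """Parse Gutenberg articles."""
--     lines = []
--     previous_line = None
--     for i, line in enumerate(article.split('\n')):
--         line = line.strip()
--         original_line = line
--         if line == '':
--             if previous_line == '':
--                 line = '\n'
--             else:
--                 previous_line = original_line
--                 continue
--         previous_line = original_line
--         lines.append(line)
--     return (' '.join(lines)).split('\n')
-- ===== SOURCE B (Python) =====
-- from typing import List
--
-- def paragraph_parser(article: str) -> List[str]: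
--     """Parse Gutenberg articles (run-aggregation rewrite)."""
--     stripped = [ln.strip() for ln in article.split('\n')]
--     pieces = []
--     i, n = 0, len(stripped)
--     while i < n:
--         blank = stripped[i] == ''
--         j = i + 1
--         while j < n and (stripped[j] == '') == blank:
--             j += 1
--         if blank:
--             pieces.extend(['\n'] * (j - i - 1))
--         else:
--             pieces.extend(stripped[i:j])
--         i = j
--     return ' '.join(pieces).split('\n')
-- ===== Notes on version B (the rewrite author's own statement) =====
-- stated objective: alternative
-- what changed: Replaces A's per-line previous_line state machine with a two-pass run-aggregation: strip all lines once, then scan maximal runs of blank/non-blank lines, emitting k-1 newline markers per blank run of length k.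
import Mathlib
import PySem

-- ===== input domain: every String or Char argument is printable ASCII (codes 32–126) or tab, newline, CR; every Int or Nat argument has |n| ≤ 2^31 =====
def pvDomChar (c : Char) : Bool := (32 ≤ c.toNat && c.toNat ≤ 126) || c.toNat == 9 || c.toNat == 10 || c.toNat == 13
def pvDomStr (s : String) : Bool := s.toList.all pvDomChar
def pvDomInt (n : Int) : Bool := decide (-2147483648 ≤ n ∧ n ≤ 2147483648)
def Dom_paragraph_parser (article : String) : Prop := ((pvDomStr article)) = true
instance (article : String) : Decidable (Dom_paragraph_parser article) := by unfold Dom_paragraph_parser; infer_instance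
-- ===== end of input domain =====

-- B replaces A's per-line previous_line state machine with explicit run aggregation
-- (strip once, then group maximal blank/non-blank runs); alternative decomposition, same cost.

-- ===== PORT A =====
-- (sep "\n" is a nonempty literal, so PySem.Str.split? is always `some`; .getD [] is unreachable)
-- one loop step of A: strip the line, then the blank / previous-blank branches
def pvStepA (st : List String × Option String) (line0 : String) : List String × Option String :=
  let line := PySem.Str.strip line0
  let original_line := line
  if line == "" then
    if st.2 == some "" then (st.1 ++ ["\n"], some original_line)
    else (st.1, some original_line)
  else (st.1 ++ [line], some original_line)

def paragraph_parser (article : String) : List String :=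
  let res := ((PySem.Str.split? article "\n").getD []).foldl pvStepA ([], none)
  (PySem.Str.split? (PySem.Str.join " " res.1) "\n").getD []

-- ===== PORT B =====
-- the outer while-loop of Source B: each iteration consumes one maximal run of
-- equally-blank lines (the inner j-scan is the takeWhile/dropWhile pair)
def pvGroupRuns : List String → List String
  | [] => []
  | x :: xs =>
    let blank := x == ""
    let run := xs.takeWhile (fun y => ((y == "") == blank))
    let rest := xs.dropWhile (fun y => ((y == "") == blank))
    (if blank then List.replicate run.length "\n" else x :: run) ++ pvGroupRuns rest
termination_by l => l.length
decreasing_by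
  simp only [List.length_cons]
  exact Nat.lt_succ_of_le (List.length_dropWhile_le _ _)

def paragraph_parser_alt (article : String) : List String :=
  let stripped := ((PySem.Str.split? article "\n").getD []).map PySem.Str.strip
  (PySem.Str.split? (PySem.Str.join " " (pvGroupRuns stripped)) "\n").getD []

-- ===== PRECONDITION & SPEC =====
def Spec_paragraph_parser (article : String) (out : List String) : Prop := out = paragraph_parser_alt article
instance (article : String) (out : List String) : Decidable (Spec_paragraph_parser article out) := by unfold Spec_paragraph_parser; infer_instance

-- ===== CLAIM (what is proved, stated in full; the proofs are below) =====
def Claim_equal_paragraph_parser : Prop := ∀ (article : String), Dom_paragraph_parser article → Spec_paragraph_parser article (paragraph_parser article)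

-- ===== LEMMAS AND PROOFS =====

-- A's loop step on an ALREADY-stripped line (pvStepA = pvStepS ∘ strip)
def pvStepS (st : List String × Option String) (line : String) : List String × Option String :=
  if line == "" then
    if st.2 == some "" then (st.1 ++ ["\n"], some line)
    else (st.1, some line)
  else (st.1 ++ [line], some line)

-- A's state machine as a pure function of (previous line was blank, remaining lines)
def pvMachine : Bool → List String → List String
  | _, [] => []
  | b, x :: xs =>
    if x == "" then (if b then ["\n"] else []) ++ pvMachine true xs
    else x :: pvMachine false xs

lemma pvFoldS (l : List String) (acc : List String) (prev : Option String) :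
    (l.foldl pvStepS (acc, prev)).1 = acc ++ pvMachine (prev == some "") l := by
  induction l generalizing acc prev with
  | nil => simp [pvMachine]
  | cons x xs ih =>
    simp only [List.foldl_cons, pvStepS, pvMachine]
    by_cases hx : x = ""
    · subst hx
      by_cases hp : prev = some ""
      · subst hp; simp [ih]
      · have : (prev == some "") = false := by simp [hp]
        simp [this, ih]
    · have hxb : (x == "") = false := by simp [hx]
      simp [hxb, ih]

-- a blank run: each of its k lines after the first emits one "\n"
lemma pvMachine_true (l : List String) :
    pvMachine true l =
      List.replicate (l.takeWhile (fun y => ((y == "") == true))).length "\n"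
        ++ pvMachine false (l.dropWhile (fun y => ((y == "") == true))) := by
  induction l with
  | nil => simp [pvMachine]
  | cons x xs ih =>
    by_cases hx : x = ""
    · subst hx
      simp only [List.takeWhile_cons, List.dropWhile_cons]
      simp [pvMachine, ih, List.replicate_succ]
    · have hxb : (x == "") = false := by simp [hx]
      simp [hxb, pvMachine]

-- a non-blank run is copied verbatim
lemma pvMachine_false_run (l : List String) :
    pvMachine false l =
      l.takeWhile (fun y => ((y == "") == false))
        ++ pvMachine false (l.dropWhile (fun y => ((y == "") == false))) := by
  induction l with
  | nil => simp [pvMachine]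
  | cons x xs ih =>
    by_cases hx : x = ""
    · have hxb : (x == "") = true := by simp [hx]
      simp [hxb]
    · have hxb : (x == "") = false := by simp [hx]
      simp only [List.takeWhile_cons, List.dropWhile_cons, hxb]
      simp [pvMachine, hxb, ih]

lemma pvMachine_eq_groupRuns : ∀ (n : Nat) (l : List String), l.length ≤ n →
    pvMachine false l = pvGroupRuns l := by
  intro n
  induction n with
  | zero =>
    intro l hl
    have : l = [] := List.eq_nil_of_length_eq_zero (Nat.le_zero.mp hl)
    subst this; simp [pvMachine, pvGroupRuns]
  | succ n ih =>
    intro l hl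
    cases l with
    | nil => simp [pvMachine, pvGroupRuns]
    | cons x xs =>
      by_cases hx : x = ""
      · subst hx
        have h1 : pvMachine false ("" :: xs) = pvMachine true xs := by
          simp [pvMachine]
        rw [h1, pvMachine_true, pvGroupRuns]
        have hrest : (xs.dropWhile (fun y => ((y == "") == true))).length ≤ n := by
          have := List.length_dropWhile_le (fun y => ((y == "") == true)) xs
          simp only [List.length_cons] at hl; omega
        rw [ih _ hrest]
        simp
      · have hxb : (x == "") = false := by simp [hx]
        have h1 : pvMachine false (x :: xs) = x :: pvMachine false xs := by
          simp [pvMachine, hxb]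
        rw [h1, pvMachine_false_run, pvGroupRuns]
        have hrest : (xs.dropWhile (fun y => ((y == "") == false))).length ≤ n := by
          have := List.length_dropWhile_le (fun y => ((y == "") == false)) xs
          simp only [List.length_cons] at hl; omega
        rw [ih _ hrest]
        simp [hxb]

-- A's whole loop, as a function of the stripped line list, is B's run grouping
lemma pvLines (l : List String) :
    (l.foldl pvStepA ([], none)).1 = pvGroupRuns (l.map PySem.Str.strip) := by
  have h : l.foldl pvStepA ([], none) = (l.map PySem.Str.strip).foldl pvStepS ([], none) := by
    rw [List.foldl_map]; rfl
  rw [h, pvFoldS]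
  have hb : ((none : Option String) == some "") = false := rfl
  rw [hb, pvMachine_eq_groupRuns (l.map PySem.Str.strip).length _ le_rfl]
  simp

-- ===== VERDICT (by name: the statement is the Claim_ definition above) =====
theorem paragraph_parser_spec : Claim_equal_paragraph_parser := by
  intro article _
  show (PySem.Str.split?
      (PySem.Str.join " " (((PySem.Str.split? article "\n").getD []).foldl pvStepA ([], none)).1)
      "\n").getD []
    = (PySem.Str.split?
      (PySem.Str.join " " (pvGroupRuns (((PySem.Str.split? article "\n").getD []).map PySem.Str.strip)))
      "\n").getD []
  rw [pvLines]
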